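-- pv_equiv track=rewrite | github.com/MishuPtm/tu_dublin_python | gettysburg.py | count_unique_words
-- ===== SOURCE A (Python) =====
-- import string
--
-- def remove_punctuation(input_str):
--     output = input_str
--     for sign in string.punctuation:
--         output = output.replace(sign, " ")
--     output = output.replace("  ", " ")
--     return output
--
-- def count_unique_words(input_str, stop_words):
--     counter = {}
--     for word in remove_punctuation(input_str).split(" "):
--         word = word.lower().strip()
--         if word not in stop_words and len(word) > 3:
--             if word not in counter:
--                 counter[word] = 1
--             else:
--                 counter[word] += 1
--     return counter
-- ===== SOURCE B (Python) =====
-- import string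
--
--
-- def remove_punctuation(input_str):
--     output = input_str
--     for sign in string.punctuation:
--         output = output.replace(sign, " ")
--     output = output.replace("  ", " ")
--     return output
--
--
-- def count_unique_words(input_str, stop_words):
--     # Stage 1: normalize every token, then filter the kept words.
--     tokens = [t.lower().strip() for t in remove_punctuation(input_str).split(" ")]
--     words = [w for w in tokens if w not in stop_words and len(w) > 3]
--     # Stage 2: count-and-remove partition loop: take the first remaining word,
--     # delete ALL its occurrences at once, and record the count as the length drop.
--     # First-occurrence order of the result matches A's dict insertion order.
--     result = {}
--     while words:
--         w = words[0]
--         rest = [x for x in words if x != w]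
--         result[w] = len(words) - len(rest)
--         words = rest
--     return result
-- ===== Notes on version B (the rewrite author's own statement) =====
-- stated objective: alternative
-- what changed: B replaces A's per-word incremental dict counting by a staged pipeline: it first materializes the filtered normalized word list, then runs a count-and-remove partition loop that repeatedly takes the first remaining word, deletes all its occurrences in one filter pass and records the count as the length drop.
import Mathlib
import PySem

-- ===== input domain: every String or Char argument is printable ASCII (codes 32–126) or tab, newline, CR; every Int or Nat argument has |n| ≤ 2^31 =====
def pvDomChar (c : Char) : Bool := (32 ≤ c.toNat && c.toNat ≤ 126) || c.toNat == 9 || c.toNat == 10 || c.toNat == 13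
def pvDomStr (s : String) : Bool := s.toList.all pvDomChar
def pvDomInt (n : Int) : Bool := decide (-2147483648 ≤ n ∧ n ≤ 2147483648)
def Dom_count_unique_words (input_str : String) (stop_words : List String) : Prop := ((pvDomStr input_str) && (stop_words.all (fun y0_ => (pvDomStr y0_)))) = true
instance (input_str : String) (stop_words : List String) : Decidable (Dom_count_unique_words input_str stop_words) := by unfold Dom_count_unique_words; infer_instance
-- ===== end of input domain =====

-- B stages the work: it first builds the filtered normalized word list, then counts by a
-- count-and-remove partition loop (delete all occurrences of the first word, count = length drop),
-- instead of A's per-word incremental dict counter (alternative decomposition, same cost class).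


-- ===== PORT A =====
-- string.punctuation, as a list of chars (the loop 'for sign in string.punctuation')
def pvPunct : List Char := "!\"#$%&'()*+,-./:;<=>?@[\\]^_`{|}~".toList

-- helper shared by both Python files verbatim
def remove_punctuation (input_str : String) : String :=
  let output := pvPunct.foldl (fun output sign => PySem.Str.replace output (String.ofList [sign]) " ") input_str
  PySem.Str.replace output "  " " "

def count_unique_words (input_str : String) (stop_words : List String) : List (String × Int) :=
  -- split(" "): the separator is the literal nonempty " ", so split? is always some; getD [] is exact
  let counter : PySem.Dict String Int :=
    ((PySem.Str.split? (remove_punctuation input_str) " ").getD []).foldl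
      (fun counter word =>
        let word := PySem.Str.strip (PySem.Str.lower word)
        if word ∉ stop_words ∧ 3 < PySem.Str.len word then
          if counter.contains word = false then counter.insert word 1
          else counter.insert word (counter.getD word 0 + 1)  -- counter[word] += 1 (key present)
        else counter)
      PySem.Dict.empty
  counter.items

-- ===== PORT B =====
-- the 'while words:' count-and-remove loop of Source B; terminates because the first word is removed
def pvTally : List String → PySem.Dict String Int → PySem.Dict String Int
  | [], result => result
  | w :: t, result =>
    let words := w :: t
    let rest := words.filter (fun x => x ≠ w)
    pvTally rest (result.insert w ((words.length : Int) - rest.length))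
termination_by ws _ => ws.length
decreasing_by
  simp only [List.filter_cons, decide_not, decide_true, Bool.not_true, List.length_cons]
  exact Nat.lt_succ_of_le (List.length_filter_le _ t)

def count_unique_words_alt (input_str : String) (stop_words : List String) : List (String × Int) :=
  let tokens := ((PySem.Str.split? (remove_punctuation input_str) " ").getD []).map
    (fun t => PySem.Str.strip (PySem.Str.lower t))
  let words := tokens.filter (fun w => w ∉ stop_words ∧ 3 < PySem.Str.len w)
  (pvTally words PySem.Dict.empty).items

-- ===== PRECONDITION & SPEC =====
def Spec_count_unique_words (input_str : String) (stop_words : List String) (out : List (String × Int)) : Prop := out = count_unique_words_alt input_str stop_words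
instance (input_str : String) (stop_words : List String) (out : List (String × Int)) : Decidable (Spec_count_unique_words input_str stop_words out) := by unfold Spec_count_unique_words; infer_instance

-- ===== CLAIM (what is proved, stated in full; the proofs are below) =====
def Claim_equal_count_unique_words : Prop := ∀ (input_str : String) (stop_words : List String), Dom_count_unique_words input_str stop_words → Spec_count_unique_words input_str stop_words (count_unique_words input_str stop_words)

-- ===== LEMMAS AND PROOFS =====

-- A's counting loop over any word list equals Counter of the kept normalized words, as items
theorem pv_fold_eq_counter (ws : List String) (stop_words : List String) :
    ws.foldl
      (fun (counter : PySem.Dict String Int) word =>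
        let word := PySem.Str.strip (PySem.Str.lower word)
        if word ∉ stop_words ∧ 3 < PySem.Str.len word then
          if counter.contains word = false then counter.insert word 1
          else counter.insert word (counter.getD word 0 + 1)
        else counter)
      PySem.Dict.empty
    = PySem.Dict.counter
        ((ws.filter (fun word => decide (PySem.Str.strip (PySem.Str.lower word) ∉ stop_words ∧
            3 < PySem.Str.len (PySem.Str.strip (PySem.Str.lower word))))).map
          (fun word => PySem.Str.strip (PySem.Str.lower word))) := by
  rw [PySem.List.foldl_congr_mem _ _
      (fun (counter : PySem.Dict String Int) word =>
        if PySem.Str.strip (PySem.Str.lower word) ∉ stop_words ∧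
            3 < PySem.Str.len (PySem.Str.strip (PySem.Str.lower word)) then
          counter.insert (PySem.Str.strip (PySem.Str.lower word))
            (counter.getD (PySem.Str.strip (PySem.Str.lower word)) 0 + 1)
        else counter) _ ?_]
  · rw [PySem.List.foldl_ite_eq_foldl_filter
        (fun word => PySem.Str.strip (PySem.Str.lower word) ∉ stop_words ∧
            3 < PySem.Str.len (PySem.Str.strip (PySem.Str.lower word)))
        (fun (counter : PySem.Dict String Int) word =>
          counter.insert (PySem.Str.strip (PySem.Str.lower word))
            (counter.getD (PySem.Str.strip (PySem.Str.lower word)) 0 + 1))]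
    rw [← PySem.Dict.foldl_insert_getD_add_one_eq_counter, List.foldl_map]
  · intro acc x _
    dsimp only
    by_cases hp : PySem.Str.strip (PySem.Str.lower x) ∉ stop_words ∧
        3 < PySem.Str.len (PySem.Str.strip (PySem.Str.lower x))
    · simp only [if_pos hp]
      by_cases hc : acc.contains (PySem.Str.strip (PySem.Str.lower x)) = false
      · rw [if_pos hc, PySem.Dict.getD_of_not_contains _ _ hc]; norm_num
      · rw [if_neg hc]
    · simp only [if_neg hp]

-- countP of a predicate plus countP of its negation is the length
theorem pv_countP_not (p : String → Bool) (l : List String) :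
    l.countP p + l.countP (fun a => !p a) = l.length := by
  induction l with
  | nil => simp
  | cons h t ih => by_cases hp : p h = true <;> simp [hp] <;> omega

-- ordered dedup commutes with filter
theorem pv_ofList_filter (q : String → Bool) (t : List String) :
    PySem.Set.ofList (t.filter q) = (PySem.Set.ofList t).filter q := by
  induction t using List.reverseRecOn with
  | nil => simp
  | append_singleton xs x ih =>
    rw [List.filter_append, PySem.Set.ofList_append_singleton]
    by_cases hq : q x = true
    · simp only [List.filter_singleton, hq, cond_true, PySem.Set.ofList_append_singleton, ih,
        PySem.Set.add_eq_ite]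
      by_cases hx : x ∈ PySem.Set.ofList xs
      · rw [if_pos hx, if_pos (List.mem_filter.mpr ⟨hx, hq⟩)]
      · rw [if_neg hx, if_neg (fun hc => hx (List.mem_filter.mp hc).1), List.filter_append,
          List.filter_singleton]
        simp [hq]
    · simp only [List.filter_singleton, hq, cond_false, List.append_nil, ih, PySem.Set.add_eq_ite]
      by_cases hx : x ∈ PySem.Set.ofList xs
      · rw [if_pos hx]
      · rw [if_neg hx, List.filter_append, List.filter_singleton]
        simp [hq]

-- first-occurrence dedup of w :: t is w followed by the dedup of t with w removed
theorem pv_dedup_cons (w : String) (t : List String) :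
    PySem.Set.ofList (w :: t) = w :: PySem.Set.ofList (t.filter (fun y => y ≠ w)) := by
  rw [PySem.Set.ofList_cons, pv_ofList_filter]
  congr 1
  simp only [PySem.Set.discard]
  apply List.filter_congr
  intro a _
  simp [Bool.beq_eq_decide_eq]

-- the count-and-remove loop, started on fresh keys, appends Counter(ws)'s items
theorem pv_tally_items (n : Nat) : ∀ (ws : List String), ws.length ≤ n →
    ∀ (d : PySem.Dict String Int), d.keys.Nodup → (∀ w ∈ ws, d.contains w = false) →
    (pvTally ws d).items
      = d.items ++ (PySem.Set.ofList ws).map (fun w => (w, (ws.count w : Int))) := by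
  induction n with
  | zero =>
    intro ws hlen d _ _
    rw [List.length_eq_zero_iff.mp (Nat.le_zero.mp hlen)]
    simp [pvTally]
  | succ n ih =>
    intro ws hlen d hnd hfresh
    match ws with
    | [] => simp [pvTally]
    | w :: t =>
      have hrest : (w :: t).filter (fun x => x ≠ w) = t.filter (fun x => x ≠ w) := by
        simp
      have hlenle : (t.filter (fun x => (x ≠ w : Bool))).length ≤ n := by
        have := List.length_filter_le (fun x => (x ≠ w : Bool)) t
        simp only [List.length_cons] at hlen
        omega
      have hcount : (w :: t).count w + ((w :: t).filter (fun y => (y ≠ w : Bool))).length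
          = (w :: t).length := by
        simp only [List.count_eq_countP, ← List.countP_eq_length_filter]
        have := pv_countP_not (fun x => x == w) (w :: t)
        have hcg : (w :: t).countP (fun a => !(a == w)) = (w :: t).countP (fun y => (y ≠ w : Bool)) := by
          apply List.countP_congr
          intro a _
          simp [Bool.beq_eq_decide_eq]
        omega
      rw [pvTally]
      simp only [hrest]
      rw [ih _ (by simpa [hrest] using hlenle) _
        (PySem.Dict.nodup_keys_insert d w _ hnd) ?fresh]
      case fresh =>
        intro x hx
        have hxt : x ∈ t := (List.mem_filter.mp hx).1
        have hxw : x ≠ w := by simpa using (List.mem_filter.mp hx).2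
        rw [PySem.Dict.contains_insert]
        simp [hxw, hfresh x (List.mem_cons_of_mem _ hxt)]
      rw [PySem.Dict.items_insert_of_not_contains _ _ (hfresh w (List.mem_cons_self))]
      rw [pv_dedup_cons, List.map_cons]
      -- recorded count = list.count of the head word
      have hc : ((w :: t).length : Int) - ((t.filter (fun x => (x ≠ w : Bool))).length : Int)
          = ((w :: t).count w : Int) := by
        simp only [hrest] at hcount
        omega
      -- counts of the surviving words are unchanged by removing w
      have hm : List.map (fun x => (x, ((t.filter (fun y => (y ≠ w : Bool))).count x : Int)))
            (PySem.Set.ofList (t.filter (fun y => (y ≠ w : Bool))))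
          = List.map (fun x => (x, ((w :: t).count x : Int)))
            (PySem.Set.ofList (t.filter (fun y => (y ≠ w : Bool)))) := by
        apply List.map_congr_left
        intro x hx
        have hxw : x ≠ w := by
          have := (PySem.List.mem_dedup _ x).mp hx
          simpa using (List.mem_filter.mp this).2
        have h2 : (t.filter (fun y => (y ≠ w : Bool))).count x = t.count x :=
          List.count_filter (by simpa using hxw)
        simp only [h2]
        rw [List.count_cons_of_ne hxw.symm]
      rw [hc, hm, List.append_assoc, List.singleton_append]

-- ===== VERDICT (by name: the statement is the Claim_ definition above) =====
theorem count_unique_words_spec : Claim_equal_count_unique_words := by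
  intro input_str stop_words _
  unfold Spec_count_unique_words count_unique_words count_unique_words_alt
  dsimp only
  rw [pv_fold_eq_counter, PySem.Dict.items_counter]
  rw [List.filter_map]
  rw [pv_tally_items _ _ (le_refl _) _ (by simp [PySem.Dict.keys_empty])
    (fun w _ => PySem.Dict.contains_empty w)]
  have he : (PySem.Dict.empty : PySem.Dict String Int).items = [] := rfl
  rw [he, List.nil_append]
  simp only [Function.comp_def]
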